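-- pv_equiv track=rewrite | github.com/JSM2003/DataMining_IITD | A3/Q1/submission.py | _pick_pq_m
-- ===== SOURCE A (Python) =====
-- def _pick_pq_m(d: int) -> int:
--     if d <= 8:
--         return max(1, d)
--     target = min(64, max(4, d // 2))
--     for m in range(target, 0, -1):
--         if d % m == 0:
--             return m
--     return 4
-- ===== SOURCE B (Python) =====
-- def _pick_pq_m(d: int) -> int:
--     if d <= 8:
--         return max(1, d)
--     target = min(64, max(4, d // 2))
--     best = 1
--     i = 1
--     while i * i <= d:
--         if d % i == 0:
--             if i <= target and i > best:
--                 best = i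
--             j = d // i
--             if j <= target and j > best:
--                 best = j
--         i += 1
--     return best
-- ===== Notes on version B (the rewrite author's own statement) =====
-- stated objective: alternative
-- what changed: The descending linear scan from target with early return on the first divisor is replaced by an ascending factor-pair enumeration up to sqrt(d) that collects both i and d//i as candidates <= target and keeps the maximum.
import Mathlib
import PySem

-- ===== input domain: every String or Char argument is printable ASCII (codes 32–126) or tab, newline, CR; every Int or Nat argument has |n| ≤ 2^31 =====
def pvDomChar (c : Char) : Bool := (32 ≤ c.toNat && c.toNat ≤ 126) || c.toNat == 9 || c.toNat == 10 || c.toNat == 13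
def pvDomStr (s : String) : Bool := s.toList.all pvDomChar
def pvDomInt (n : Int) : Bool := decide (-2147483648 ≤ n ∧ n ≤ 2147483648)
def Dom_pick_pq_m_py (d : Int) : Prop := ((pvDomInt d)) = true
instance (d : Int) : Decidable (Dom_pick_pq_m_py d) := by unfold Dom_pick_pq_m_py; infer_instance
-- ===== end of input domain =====

-- B replaces A's descending scan with early return by an ascending factor-pair
-- enumeration up to sqrt(d) keeping the maximum candidate (alternative algorithm).

-- ===== PORT A =====
-- the for-loop over range(target, 0, -1) with early return
def pickLoopA (d : Int) : List Int → Int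
  | [] => 4
  | m :: rest => if PySem.Int.mod d m = 0 then m else pickLoopA d rest

def pick_pq_m_py (d : Int) : Int :=
  if d ≤ 8 then max 1 d
  else pickLoopA d (PySem.List.pyRange (min 64 (max 4 (PySem.Int.floordiv d 2))) 0 (-1))

-- ===== PORT B =====
-- cited by pickLoopB's decreasing_by
theorem pv_le_of_mul_self_le {i d : Int} (h : i * i ≤ d) : i ≤ d := by
  by_cases h0 : i ≤ 0
  · nlinarith [mul_self_nonneg i]
  · nlinarith

-- the while-loop of Source B: i ascends while i*i ≤ d, best accumulates
def pickLoopB (d target i best : Int) : Int :=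
  if _h : i * i ≤ d then
    let best1 :=
      if PySem.Int.mod d i = 0 then
        let b1 := if i ≤ target ∧ best < i then i else best
        let j := PySem.Int.floordiv d i
        if j ≤ target ∧ b1 < j then j else b1
      else best
    pickLoopB d target (i + 1) best1
  else best
termination_by (d + 1 - i).toNat
decreasing_by
  have h1 := pv_le_of_mul_self_le _h
  omega

def pick_pq_m_py_alt (d : Int) : Int :=
  if d ≤ 8 then max 1 d
  else pickLoopB d (min 64 (max 4 (PySem.Int.floordiv d 2))) 1 1

-- ===== PRECONDITION & SPEC =====
def Spec_pick_pq_m_py (d : Int) (out : Int) : Prop := out = pick_pq_m_py_alt d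
instance (d : Int) (out : Int) : Decidable (Spec_pick_pq_m_py d out) := by unfold Spec_pick_pq_m_py; infer_instance

-- ===== CLAIM (what is proved, stated in full; the proofs are below) =====
def Claim_equal_pick_pq_m_py : Prop := ∀ (d : Int), Dom_pick_pq_m_py d → Spec_pick_pq_m_py d (pick_pq_m_py d)

-- ===== LEMMAS AND PROOFS =====

-- r is THE greatest divisor of d not exceeding t
def Good (d t r : Int) : Prop :=
  r ∣ d ∧ 1 ≤ r ∧ r ≤ t ∧ ∀ m, 1 ≤ m → m ≤ t → m ∣ d → m ≤ r

theorem good_unique {d t r r' : Int} (h : Good d t r) (h' : Good d t r') : r = r' :=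
  le_antisymm (h'.2.2.2 r h.2.1 h.2.2.1 h.1) (h.2.2.2 r' h'.2.1 h'.2.2.1 h'.1)

-- A's loop computes the greatest divisor ≤ t
theorem pickLoopA_good (d : Int) (_hd : 1 ≤ d) :
    ∀ t : Int, 1 ≤ t → Good d t (pickLoopA d (PySem.List.pyRange t 0 (-1))) := by
  intro t ht
  induction t, ht using Int.le_induction with
  | base =>
    rw [PySem.List.pyRange_neg_one_cons (by omega : (0:Int) < 1), pickLoopA]
    have h1 : PySem.Int.mod d 1 = 0 := (PySem.Int.mod_eq_zero_iff_dvd d 1).2 (one_dvd d)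
    rw [if_pos h1]
    exact ⟨one_dvd d, le_refl 1, le_refl 1, fun m _ h2 _ => h2⟩
  | succ t ht ih =>
    rw [PySem.List.pyRange_neg_one_cons (by omega : (0:Int) < t + 1), pickLoopA]
    by_cases hmod : PySem.Int.mod d (t + 1) = 0
    · rw [if_pos hmod]
      exact ⟨(PySem.Int.mod_eq_zero_iff_dvd d (t+1)).1 hmod, by omega, le_refl _,
        fun m _ h2 _ => h2⟩
    · rw [if_neg hmod]
      have heq : t + 1 - 1 = t := by ring
      rw [heq]
      obtain ⟨hdvd, h1, h2, hmax⟩ := ih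
      refine ⟨hdvd, h1, by omega, fun m hm1 hm2 hmdvd => ?_⟩
      rcases lt_or_eq_of_le hm2 with h | h
      · exact hmax m hm1 (by omega) hmdvd
      · exact absurd ((PySem.Int.mod_eq_zero_iff_dvd d (t+1)).2 (h ▸ hmdvd)) hmod

-- B's loop invariant: best is a divisor in [1,t] dominating every divisor one of
-- whose cofactor pair is below i; at exit it is the greatest divisor ≤ t
theorem pickLoopB_good (d t : Int) (_hd : 9 ≤ d) (_ht1 : 1 ≤ t) (_htd : t ≤ d) :
    ∀ i best : Int, 1 ≤ i → best ∣ d → 1 ≤ best → best ≤ t →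
    (∀ m, 1 ≤ m → m ≤ t → m ∣ d → (m < i ∨ d / m < i) → m ≤ best) →
    Good d t (pickLoopB d t i best) := by
  intro i
  induction hn : (d + 1 - i).toNat using Nat.strong_induction_on generalizing i with
  | _ n ih =>
  intro best hi hbdvd hb1 hbt hinv
  rw [pickLoopB.eq_def]
  split
  case isTrue hii =>
    have hid : i ≤ d := pv_le_of_mul_self_le hii
    set best1 :=
      if PySem.Int.mod d i = 0 then
        let b1 := if i ≤ t ∧ best < i then i else best
        let j := PySem.Int.floordiv d i
        if j ≤ t ∧ b1 < j then j else b1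
      else best with hbest1
    have hstep : best ≤ best1 ∧ best1 ∣ d ∧ 1 ≤ best1 ∧ best1 ≤ t ∧
        (PySem.Int.mod d i = 0 → (i ≤ t → i ≤ best1) ∧ (d / i ≤ t → d / i ≤ best1)) := by
      by_cases hmod : PySem.Int.mod d i = 0
      · have hidvd : i ∣ d := (PySem.Int.mod_eq_zero_iff_dvd d i).1 hmod
        have hfd : PySem.Int.floordiv d i = d / i :=
          PySem.Int.floordiv_eq_ediv_of_pos (by omega)
        have hjdvd : d / i ∣ d := Int.ediv_dvd_of_dvd hidvd
        rw [hbest1, if_pos hmod]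
        simp only [hfd]
        split_ifs <;>
          exact ⟨by omega, by first | exact hjdvd | exact hidvd | exact hbdvd, by omega,
            by omega, fun _ => ⟨by omega, by omega⟩⟩
      · rw [hbest1, if_neg hmod]
        exact ⟨le_refl _, hbdvd, hb1, hbt, fun h => absurd h hmod⟩
    obtain ⟨hmono, hg1, hg2, hg3, hg4⟩ := hstep
    refine ih (d + 1 - (i + 1)).toNat (by omega) (i + 1) rfl best1 (by omega) hg1 hg2 hg3 ?_
    intro m hm1 hmt hmdvd hcase
    rcases hcase with hlt | hlt
    · rcases lt_or_eq_of_le (by omega : m ≤ i) with h | h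
      · exact le_trans (hinv m hm1 hmt hmdvd (Or.inl h)) hmono
      · subst h
        have := (hg4 ((PySem.Int.mod_eq_zero_iff_dvd d m).2 hmdvd)).1 hmt
        omega
    · rcases lt_or_eq_of_le (by omega : d / m ≤ i) with h | h
      · exact le_trans (hinv m hm1 hmt hmdvd (Or.inr h)) hmono
      · -- d / m = i, so m = d / i is the cofactor considered at this step
        have hcof : d / (d / m) = m := by
          obtain ⟨k, hk⟩ := hmdvd
          have hk' : d / m = k := by
            rw [hk, Int.mul_ediv_cancel_left _ (by omega : m ≠ 0)]
          rw [hk', hk, Int.mul_ediv_cancel _ (by omega : k ≠ 0)]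
        have hmodz : PySem.Int.mod d i = 0 := by
          refine (PySem.Int.mod_eq_zero_iff_dvd d i).2 ?_
          rw [← h]
          exact Int.ediv_dvd_of_dvd hmdvd
        have hres := (hg4 hmodz).2
        rw [← h, hcof] at hres
        exact le_trans (hres hmt) (le_refl _)
  case isFalse hii =>
    refine ⟨hbdvd, hb1, hbt, fun m hm1 hmt hmdvd => ?_⟩
    refine hinv m hm1 hmt hmdvd ?_
    by_contra hc
    have hprod : m * (d / m) = d := Int.mul_ediv_cancel' hmdvd
    have him : i ≤ m ∧ i ≤ d / m := by omega
    have hle : i * i ≤ m * (d / m) :=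
      mul_le_mul him.1 him.2 (by omega) (by omega)
    rw [hprod] at hle
    exact hii hle

theorem pick_pq_m_eq (d : Int) : pick_pq_m_py d = pick_pq_m_py_alt d := by
  unfold pick_pq_m_py pick_pq_m_py_alt
  split
  · rfl
  case isFalse h =>
    have hd : 9 ≤ d := by omega
    have hfd : PySem.Int.floordiv d 2 = d / 2 :=
      PySem.Int.floordiv_eq_ediv_of_pos (by omega)
    set t := min 64 (max 4 (PySem.Int.floordiv d 2)) with hT
    have hd2 : 4 ≤ d / 2 := by
      rw [Int.le_ediv_iff_mul_le (by omega)]; omega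
    have hd2d : d / 2 ≤ d := Int.ediv_le_self _ (by omega)
    have ht1 : 1 ≤ t := by rw [hT, hfd]; omega
    have htd : t ≤ d := by
      rw [hT, hfd]
      rcases le_total (64 : Int) (max 4 (d / 2)) with h' | h' <;> omega
    have hA := pickLoopA_good d (by omega) t ht1
    have hB := pickLoopB_good d t hd ht1 htd 1 1 (le_refl 1) (one_dvd d) (le_refl 1) ht1 ?_
    · exact good_unique hA hB
    · intro m hm1 hmt hmdvd hcase
      have h1 : 1 ≤ d / m := by rw [Int.le_ediv_iff_mul_le (by omega)]; omega
      omega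

-- ===== VERDICT (by name: the statement is the Claim_ definition above) =====
theorem pick_pq_m_py_spec : Claim_equal_pick_pq_m_py := by
  intro d _
  unfold Spec_pick_pq_m_py
  exact pick_pq_m_eq d
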